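-- pv_equiv track=rewrite | github.com/geraw/onion-de-bruijn | tests/test_hamiltonian_paths.py | layer_adjacency
-- ===== SOURCE A (Python) =====
-- from itertools import product
--
-- def layer_vertices(n: int, k: int) -> list[tuple[int, ...]]:
--     return [word for word in product(range(k), repeat=n) if (k - 1) in word]
--
-- def layer_adjacency(n: int, k: int) -> dict[tuple[int, ...], list[tuple[int, ...]]]:
--     adjacency: dict[tuple[int, ...], list[tuple[int, ...]]] = {}
--     for word in layer_vertices(n, k):
--         suffix = word[1:]
--         adjacency[word] = []
--         for tau in range(k):
--             candidate = suffix + (tau,)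
--             if (k - 1) in candidate:
--                 adjacency[word].append(candidate)
--     return adjacency
-- ===== SOURCE B (Python) =====
-- def layer_adjacency(n: int, k: int) -> dict:
--     """Prefix DP: grow all length-(n-1) words front-first while propagating a
--     'contains k-1' flag, then emit each vertex (d,)+w directly from (d, flag)
--     with a two-way branch -- no generate-and-filter and no membership scans."""
--     adjacency = {}
--     if n <= 0 or k <= 0:
--         return adjacency
--     # tagged: all words of length m in lex order, paired with ((k-1) in word)
--     tagged = [((), False)]
--     for _ in range(n - 1):
--         tagged = [((d,) + w, d == k - 1 or c) for d in range(k) for (w, c) in tagged]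
--     for d in range(k):
--         for w, c in tagged:
--             if d == k - 1 or c:
--                 word = (d,) + w
--                 if c:
--                     adjacency[word] = [w + (t,) for t in range(k)]
--                 else:
--                     adjacency[word] = [w + (k - 1,)]
--     return adjacency
-- ===== Notes on version B (the rewrite author's own statement) =====
-- stated objective: alternative
-- what changed: B replaces A's generate-all-then-filter with per-candidate membership scans by a prefix dynamic programming pass: it grows all length-(n-1) words front-first while propagating a boolean 'contains k-1' flag, then emits each vertex (d,)+w and its whole neighbour list directly from (d, flag) in one two-way branch, so no membership test over a word ever runs.
import Mathlib
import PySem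

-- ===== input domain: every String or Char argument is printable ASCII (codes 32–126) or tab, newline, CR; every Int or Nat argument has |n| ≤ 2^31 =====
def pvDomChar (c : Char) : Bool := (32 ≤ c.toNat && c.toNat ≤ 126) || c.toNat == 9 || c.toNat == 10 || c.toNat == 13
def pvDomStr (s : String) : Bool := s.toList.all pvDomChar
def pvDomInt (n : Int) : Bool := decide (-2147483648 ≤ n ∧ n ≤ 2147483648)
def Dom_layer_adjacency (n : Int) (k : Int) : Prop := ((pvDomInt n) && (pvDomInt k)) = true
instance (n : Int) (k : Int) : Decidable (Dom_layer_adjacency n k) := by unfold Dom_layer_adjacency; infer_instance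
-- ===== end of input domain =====

-- B replaces generate-all-then-filter with per-candidate membership scans by a prefix DP that
-- propagates a 'contains k-1' flag and emits each vertex and its neighbour list in one branch;
-- objective: alternative algorithm.

-- ===== PORT A =====
-- itertools.product(range(k), repeat=m), in product's lexicographic order (first coordinate slowest)
def pvProduct (k : Int) : Nat → List (List Int)
  | 0 => [[]]
  | m + 1 => (PySem.List.pyRange 0 k 1).flatMap (fun d => (pvProduct k m).map (fun w => d :: w))

def layer_vertices (n : Int) (k : Int) : List (List Int) :=
  (pvProduct k n.toNat).filter (fun word => decide ((k - 1) ∈ word))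

def layer_adjacency (n : Int) (k : Int) : List (List Int × List (List Int)) :=
  ((layer_vertices n k).foldl
    (fun adjacency word =>
      let suffix := PySem.List.slice word (some 1) none
      let adjacency := adjacency.insert word []
      (PySem.List.pyRange 0 k 1).foldl
        (fun adjacency tau =>
          let candidate := suffix ++ [tau]
          if (k - 1) ∈ candidate then adjacency.modify word [] (fun l => l ++ [candidate])
          else adjacency)
        adjacency)
    PySem.Dict.empty).items

-- ===== PORT B =====
-- one step of Source B's prefix DP: tagged = [((d,)+w, d == k-1 or c) for d in range(k) for (w,c) in tagged]
def bStep (k : Int) (tagged : List (List Int × Bool)) : List (List Int × Bool) :=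
  (PySem.List.pyRange 0 k 1).flatMap
    (fun d => tagged.map (fun wc => (d :: wc.1, decide (d = k - 1) || wc.2)))

def layer_adjacency_alt (n : Int) (k : Int) : List (List Int × List (List Int)) :=
  if n ≤ 0 ∨ k ≤ 0 then PySem.Dict.empty.items
  else
    let tagged := (List.range (n.toNat - 1)).foldl (fun t _ => bStep k t) [([], false)]
    ((PySem.List.pyRange 0 k 1).foldl
      (fun adjacency d =>
        tagged.foldl
          (fun adjacency wc =>
            if d = k - 1 ∨ wc.2 = true then
              let word := d :: wc.1
              if wc.2 then
                adjacency.insert word ((PySem.List.pyRange 0 k 1).map (fun t => wc.1 ++ [t]))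
              else adjacency.insert word [wc.1 ++ [k - 1]]
            else adjacency)
          adjacency)
      PySem.Dict.empty).items

-- ===== PRECONDITION & SPEC =====
-- A raises ValueError for n < 0 (itertools.product with a negative repeat); that is all Pre_ excludes.
def Pre_layer_adjacency (n : Int) (_k : Int) : Prop := 0 ≤ n
instance (n : Int) (k : Int) : Decidable (Pre_layer_adjacency n k) := by
  unfold Pre_layer_adjacency; infer_instance

def pvWitness_layer_adjacency : Int × Int := (2, 2)


def Spec_layer_adjacency (n : Int) (k : Int) (out : List (List Int × List (List Int))) : Prop :=
  out = layer_adjacency_alt n k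
instance (n : Int) (k : Int) (out : List (List Int × List (List Int))) :
    Decidable (Spec_layer_adjacency n k out) := by unfold Spec_layer_adjacency; infer_instance

-- ===== CLAIM (what is proved, stated in full; the proofs are below) =====
def Claim_equal_layer_adjacency : Prop :=
  ∀ (n : Int) (k : Int), Dom_layer_adjacency n k → Pre_layer_adjacency n k →
    Spec_layer_adjacency n k (layer_adjacency n k)

-- ===== LEMMAS AND PROOFS =====

-- the per-word entry as both programs ultimately produce it
def pairF (k : Int) (w : List Int) : List Int × List (List Int) :=
  (w, if (k - 1) ∈ w.tail then (PySem.List.pyRange 0 k 1).map (fun t => w.tail ++ [t])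
      else [w.tail ++ [k - 1]])

-- the per-word neighbour list as A computes it (the inner loop, as a list fold)
def innerA (k : Int) (w : List Int) : List (List Int) :=
  (PySem.List.pyRange 0 k 1).foldl
    (fun acc tau =>
      if (k - 1) ∈ (PySem.List.slice w (some 1) none ++ [tau])
      then acc ++ [PySem.List.slice w (some 1) none ++ [tau]] else acc) []

theorem mem_pvProduct_bound (k : Int) (m : Nat) :
    ∀ w ∈ pvProduct k m, ∀ x ∈ w, 0 ≤ x ∧ x < k := by
  induction m with
  | zero =>
    intro w hw x hx
    simp [pvProduct] at hw
    subst hw; simp at hx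
  | succ m ih =>
    intro w hw x hx
    simp only [pvProduct, List.mem_flatMap, List.mem_map] at hw
    obtain ⟨d, hd, w', hw', rfl⟩ := hw
    rw [PySem.List.mem_pyRange_one] at hd
    rcases List.mem_cons.mp hx with rfl | hx'
    · exact hd
    · exact ih w' hw' x hx'

theorem nodup_pvProduct (k : Int) (m : Nat) : (pvProduct k m).Nodup := by
  induction m with
  | zero => simp [pvProduct]
  | succ m ih =>
    simp only [pvProduct]
    rw [List.nodup_flatMap]
    constructor
    · intro d _
      exact ih.map (fun a b h => by injection h)
    · have h := PySem.List.nodup_pyRange_one 0 k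
      refine h.imp ?_
      intro a b hab x hxa hxb
      simp only [List.mem_map] at hxa hxb
      obtain ⟨wa, _, rfl⟩ := hxa
      obtain ⟨wb, _, hba⟩ := hxb
      exact hab (by injection hba with h1 _; exact h1.symm)

theorem foldl_modify_insert {κ ν : Type} [BEq κ] [LawfulBEq κ]
    (L : List Int) (p : Int → Prop) [DecidablePred p] (g : Int → ν → ν)
    (d : PySem.Dict κ ν) (w : κ) (dflt : ν) :
    ∀ v : ν,
      L.foldl (fun dd tau => if p tau then dd.modify w dflt (g tau) else dd) (d.insert w v)
        = d.insert w (L.foldl (fun acc tau => if p tau then g tau acc else acc) v) := by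
  induction L with
  | nil => intro v; rfl
  | cons a L ih =>
    intro v
    simp only [List.foldl_cons]
    split_ifs with h
    · rw [show (d.insert w v).modify w dflt (g a) = d.insert w (g a v) by
        simp [PySem.Dict.modify, PySem.Dict.getD_insert_self, PySem.Dict.insert_insert_self]]
      exact ih (g a v)
    · exact ih v

theorem stepA_eq_insert (k : Int) (adjacency : PySem.Dict (List Int) (List (List Int)))
    (word : List Int) :
    (PySem.List.pyRange 0 k 1).foldl
      (fun adjacency tau =>
        if (k - 1) ∈ (PySem.List.slice word (some 1) none ++ [tau])
        then adjacency.modify word [] (fun l => l ++ [PySem.List.slice word (some 1) none ++ [tau]])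
        else adjacency)
      (adjacency.insert word [])
      = adjacency.insert word (innerA k word) := by
  exact foldl_modify_insert (PySem.List.pyRange 0 k 1)
    (fun tau => (k - 1) ∈ (PySem.List.slice word (some 1) none ++ [tau]))
    (fun tau l => l ++ [PySem.List.slice word (some 1) none ++ [tau]])
    adjacency word [] []

theorem A_items (n k : Int) :
    layer_adjacency n k = (layer_vertices n k).map (fun w => (w, innerA k w)) := by
  unfold layer_adjacency
  have hf :
      (fun (adjacency : PySem.Dict (List Int) (List (List Int))) (word : List Int) =>
        let suffix := PySem.List.slice word (some 1) none
        let adjacency := adjacency.insert word []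
        (PySem.List.pyRange 0 k 1).foldl
          (fun adjacency tau =>
            let candidate := suffix ++ [tau]
            if (k - 1) ∈ candidate then adjacency.modify word [] (fun l => l ++ [candidate])
            else adjacency)
          adjacency)
      = fun adjacency word => adjacency.insert word (innerA k word) := by
    funext adjacency word
    exact stepA_eq_insert k adjacency word
  rw [hf]
  have := PySem.Dict.items_foldl_insert_fresh (layer_vertices n k)
    (fun w => w) (fun w => innerA k w) PySem.Dict.empty
    (fun a _ => PySem.Dict.contains_empty a)
    (by rw [List.map_id']; exact (nodup_pvProduct k n.toNat).filter _)
  simpa using this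

theorem innerA_eq_pairF (k : Int) (w : List Int) (hk : 1 ≤ k) :
    innerA k w = (pairF k w).2 := by
  unfold innerA pairF
  rw [PySem.List.slice_from_one]
  rw [PySem.List.foldl_append_ite (fun tau => (k - 1) ∈ (w.tail ++ [tau]))
    (fun tau => w.tail ++ [tau]) (PySem.List.pyRange 0 k 1) []]
  simp only [List.nil_append]
  by_cases hm : (k - 1) ∈ w.tail
  · rw [if_pos hm]
    congr 1
    rw [List.filter_eq_self]
    intro a _
    simp [List.mem_append, hm]
  · rw [if_neg hm]
    have hsplit : PySem.List.pyRange 0 k 1 = PySem.List.pyRange 0 (k - 1) 1 ++ [k - 1] := by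
      have := PySem.List.pyRange_one_succ_right (a := 0) (b := k - 1) (by omega)
      simpa using this
    rw [hsplit, List.filter_append]
    have h1 : (PySem.List.pyRange 0 (k - 1) 1).filter
        (fun tau => decide ((k - 1) ∈ (w.tail ++ [tau]))) = [] := by
      rw [List.filter_eq_nil_iff]
      intro a ha
      rw [PySem.List.mem_pyRange_one] at ha
      simp [List.mem_append, hm]
      omega
    have h2 : ([k - 1] : List Int).filter
        (fun tau => decide ((k - 1) ∈ (w.tail ++ [tau]))) = [k - 1] := by
      simp
    rw [h1, h2]
    simp

-- the tagged list after m DP steps is exactly the flagged product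
theorem tagged_eq (k : Int) : ∀ m : Nat,
    (List.range m).foldl (fun t _ => bStep k t) [([], false)]
      = (pvProduct k m).map (fun w => (w, decide ((k - 1) ∈ w))) := by
  intro m
  induction m with
  | zero => simp [pvProduct]
  | succ m ih =>
    rw [List.range_succ, List.foldl_append, ih]
    show bStep k _ = _
    unfold bStep
    simp only [pvProduct, List.map_flatMap, List.map_map, Function.comp_def]
    apply List.flatMap_congr
    intro d _
    apply List.map_congr_left
    intro w _
    simp only [Prod.mk.injEq, true_and, List.mem_cons]
    simp [eq_comm]

-- a nested loop over L then M is a loop over the pair list (Source B's two emission loops, flattened)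
theorem foldl_foldl_pairs {α β γ : Type} (L : List α) (M : List β) (g : γ → α → β → γ) :
    ∀ init : γ,
      L.foldl (fun acc d => M.foldl (fun acc x => g acc d x) acc) init
        = (L.flatMap (fun d => M.map (fun x => (d, x)))).foldl (fun acc p => g acc p.1 p.2) init := by
  induction L with
  | nil => intro init; rfl
  | cons a L ih =>
    intro init
    rw [List.foldl_cons, List.flatMap_cons, List.foldl_append, List.foldl_map, ih]

-- the emission phase of B, at the items level
theorem emit_items (k : Int) (m : Nat) :
    ((PySem.List.pyRange 0 k 1).foldl
      (fun adjacency d =>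
        ((pvProduct k m).map (fun w => (w, decide ((k - 1) ∈ w)))).foldl
          (fun adjacency wc =>
            if d = k - 1 ∨ wc.2 = true then
              if wc.2 then
                adjacency.insert (d :: wc.1)
                  ((PySem.List.pyRange 0 k 1).map (fun t => wc.1 ++ [t]))
              else adjacency.insert (d :: wc.1) [wc.1 ++ [k - 1]]
            else adjacency)
          adjacency)
      (PySem.Dict.empty : PySem.Dict (List Int) (List (List Int)))).items
    = ((pvProduct k (m + 1)).filter (fun w => decide ((k - 1) ∈ w))).map (pairF k) := by
  rw [foldl_foldl_pairs]
  have hstep :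
      (fun (acc : PySem.Dict (List Int) (List (List Int)))
           (p : Int × (List Int × Bool)) =>
        if p.1 = k - 1 ∨ p.2.2 = true then
          if p.2.2 then
            acc.insert (p.1 :: p.2.1) ((PySem.List.pyRange 0 k 1).map (fun t => p.2.1 ++ [t]))
          else acc.insert (p.1 :: p.2.1) [p.2.1 ++ [k - 1]]
        else acc)
      = fun acc p =>
          if (decide (p.1 = k - 1) || p.2.2) = true then
            acc.insert (p.1 :: p.2.1)
              (if p.2.2 then (PySem.List.pyRange 0 k 1).map (fun t => p.2.1 ++ [t])
               else [p.2.1 ++ [k - 1]])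
          else acc := by
    funext acc p
    by_cases h1 : p.1 = k - 1 <;> by_cases h2 : p.2.2 = true <;> simp [h1, h2]
  rw [hstep, ← List.foldl_filter]
  set P := (PySem.List.pyRange 0 k 1).flatMap
    (fun d => ((pvProduct k m).map (fun w => (w, decide ((k - 1) ∈ w)))).map
      (fun x => (d, x))) with hP
  have hPkey : P.map (fun p : Int × (List Int × Bool) => p.1 :: p.2.1) = pvProduct k (m + 1) := by
    rw [hP]
    simp only [List.map_flatMap, List.map_map, Function.comp_def]
    rfl
  have hnodup :
      ((P.filter (fun p => decide (p.1 = k - 1) || p.2.2)).map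
        (fun p : Int × (List Int × Bool) => p.1 :: p.2.1)).Nodup := by
    refine List.Nodup.sublist ?_ (hPkey ▸ nodup_pvProduct k (m + 1))
    exact List.Sublist.map _ List.filter_sublist
  rw [PySem.Dict.items_foldl_insert_fresh
    (P.filter (fun p => decide (p.1 = k - 1) || p.2.2))
    (fun p => p.1 :: p.2.1)
    (fun p => if p.2.2 then (PySem.List.pyRange 0 k 1).map (fun t => p.2.1 ++ [t])
              else [p.2.1 ++ [k - 1]])
    PySem.Dict.empty
    (fun a _ => PySem.Dict.contains_empty _) hnodup]
  rw [hP]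
  show [] ++ _ = _
  rw [List.nil_append]
  simp only [pvProduct, List.filter_flatMap, List.map_flatMap]
  apply List.flatMap_congr
  intro d _
  simp only [List.map_map, List.filter_map, List.map_map, Function.comp_def]
  rw [List.filter_congr (l := pvProduct k m)
    (q := fun w => decide ((k - 1) ∈ (d :: w)))
    (by intro w _; simp [List.mem_cons, eq_comm])]
  apply List.map_congr_left
  intro w _
  by_cases hm : (k - 1) ∈ w <;> simp [pairF, hm]

theorem B_eq (n k : Int) :
    layer_adjacency_alt n k
      = ((pvProduct k n.toNat).filter (fun w => decide ((k - 1) ∈ w))).map (pairF k) := by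
  unfold layer_adjacency_alt
  split_ifs with h
  · rw [show (PySem.Dict.empty : PySem.Dict (List Int) (List (List Int))).items = [] from rfl]
    symm
    rw [List.map_eq_nil_iff, List.filter_eq_nil_iff]
    intro w hw
    rcases h with hn | hk
    · have h0 : n.toNat = 0 := by omega
      rw [h0] at hw
      simp only [pvProduct, List.mem_singleton] at hw
      subst hw
      simp
    · cases hmm : n.toNat with
      | zero =>
        rw [hmm] at hw
        simp only [pvProduct, List.mem_singleton] at hw
        subst hw
        simp
      | succ m =>
        rw [hmm] at hw
        simp only [pvProduct] at hw
        rw [PySem.List.pyRange_one_eq_nil (by omega)] at hw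
        simp at hw
  · have hn : 0 < n := by omega
    have hnt : n.toNat = (n.toNat - 1) + 1 := by omega
    have := emit_items k (n.toNat - 1)
    rw [← hnt] at this
    rw [← this, tagged_eq]

-- ===== VERDICT (by name: the statement is the Claim_ definition above) =====
theorem layer_adjacency_spec : Claim_equal_layer_adjacency := by
  intro n k _ _
  unfold Spec_layer_adjacency
  rw [A_items, B_eq]
  unfold layer_vertices
  apply List.map_congr_left
  intro w hw
  have hwmem := List.mem_filter.mp hw
  have hk : 1 ≤ k := by
    have hkm : (k - 1) ∈ w := by simpa using hwmem.2
    have := mem_pvProduct_bound k n.toNat w hwmem.1 (k - 1) hkm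
    omega
  rw [innerA_eq_pairF k w hk]
  simp [pairF]
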